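-- pv_equiv track=rewrite | github.com/Darshu274/NLP | Solution/run_pipeline.py | build_counts_rows_in_order
-- ===== SOURCE A (Python) =====
-- def build_counts_rows_in_order(paper_ids, existing_counts_map, updated_counts_map):
--     """
--     Build CSV rows in the original paper list order.
--
--     Parameters
--     ----------
--     paper_ids : list of str
--         Ordered list of paper identifiers.
--     existing_counts_map : dict
--         Previously stored counts.
--     updated_counts_map : dict
--         Counts updated during the current run.
--
--     Returns
--     -------
--     list of dict
--         Rows suitable for CSV export.
--     """
--     rows = []
--     for pid in paper_ids:
--         if pid in updated_counts_map:
--             rows.append({"arxiv_id": pid, "count": updated_counts_map[pid]})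
--         else:
--             # preserve old if exists, otherwise blank
--             val = existing_counts_map.get(pid, "")
--             rows.append({"arxiv_id": pid, "count": val})
--     return rows
-- ===== SOURCE B (Python) =====
-- def build_counts_rows_in_order(paper_ids, existing_counts_map, updated_counts_map):
--     # Inverted "scatter" algorithm: instead of looking each pid up in the maps,
--     # iterate over the maps' items and write each value into the row positions
--     # of its pid (existing first, then updated, so updated values win).
--     counts = [""] * len(paper_ids)
--     positions = {}
--     for i, pid in enumerate(paper_ids):
--         positions.setdefault(pid, []).append(i)
--     for counts_map in (existing_counts_map, updated_counts_map):
--         for pid, val in counts_map.items():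
--             for i in positions.get(pid, []):
--                 counts[i] = val
--     return [{"arxiv_id": pid, "count": c} for pid, c in zip(paper_ids, counts)]
-- ===== Notes on version B (the rewrite author's own statement) =====
-- stated objective: alternative
-- what changed: B inverts the data flow: instead of A's gather (one lookup per pid with an if/else between the two maps), B builds a pid-to-row-positions index, allocates a blank counts column, then scatters each map's items into those positions (existing first, updated second so updates overwrite), and finally zips the column with paper_ids.
import Mathlib
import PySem

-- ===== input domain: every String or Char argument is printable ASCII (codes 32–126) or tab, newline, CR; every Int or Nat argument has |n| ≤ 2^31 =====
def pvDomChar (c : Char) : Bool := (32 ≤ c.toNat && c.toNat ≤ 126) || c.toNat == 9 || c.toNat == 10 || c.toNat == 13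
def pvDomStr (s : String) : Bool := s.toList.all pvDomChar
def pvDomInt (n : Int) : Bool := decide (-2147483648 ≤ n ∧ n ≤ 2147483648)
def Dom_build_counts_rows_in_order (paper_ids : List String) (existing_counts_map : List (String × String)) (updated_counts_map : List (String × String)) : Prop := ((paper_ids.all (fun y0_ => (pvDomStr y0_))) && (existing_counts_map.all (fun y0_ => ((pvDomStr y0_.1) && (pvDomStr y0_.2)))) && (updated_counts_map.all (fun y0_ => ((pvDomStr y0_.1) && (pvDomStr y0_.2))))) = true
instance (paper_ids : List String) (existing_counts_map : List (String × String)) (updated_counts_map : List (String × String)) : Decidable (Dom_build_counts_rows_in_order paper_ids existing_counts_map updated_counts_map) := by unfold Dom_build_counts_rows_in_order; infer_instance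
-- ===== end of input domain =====

-- ===== PORT A =====
-- B replaces A's per-pid gather-with-branch by a scatter: a pid->positions index, a blank
-- counts column filled by iterating over the maps' items (updated written last, so it wins),
-- then a zip.  Objective: alternative (same asymptotic cost, inverted data flow).
-- A's `updated_counts_map[pid]` runs only under the `pid in updated_counts_map` guard, so
-- `getD pid ""` under `contains pid` is exact there.
def build_counts_rows_in_order (paper_ids : List String) (existing_counts_map : List (String × String)) (updated_counts_map : List (String × String)) : List (List (String × String)) :=
  let updated := PySem.Dict.ofList updated_counts_map
  let existing := PySem.Dict.ofList existing_counts_map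
  paper_ids.foldl (fun rows pid =>
    if updated.contains pid then
      rows ++ [[("arxiv_id", pid), ("count", updated.getD pid "")]]
    else
      rows ++ [[("arxiv_id", pid), ("count", existing.getD pid "")]]) []

-- ===== PORT B =====
-- `positions.setdefault(pid, []).append(i)` is exactly `modify pid [] (· ++ [i])`
-- (d[k] = f(d.get(k, dflt)), same key-insertion order); counts[i] = val is List.set
-- (enumerate indices are ≥ 0, so `.toNat` is exact).
def build_counts_rows_in_order_alt (paper_ids : List String) (existing_counts_map : List (String × String)) (updated_counts_map : List (String × String)) : List (List (String × String)) :=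
  let counts0 : List String := List.replicate paper_ids.length ""
  let positions : PySem.Dict String (List Int) :=
    (PySem.List.enumerate paper_ids).foldl
      (fun d p => d.modify p.2 [] (fun l => l ++ [p.1])) PySem.Dict.empty
  let counts1 := (PySem.Dict.ofList existing_counts_map).items.foldl
    (fun cs kv => (positions.getD kv.1 []).foldl (fun cs i => cs.set i.toNat kv.2) cs) counts0
  let counts2 := (PySem.Dict.ofList updated_counts_map).items.foldl
    (fun cs kv => (positions.getD kv.1 []).foldl (fun cs i => cs.set i.toNat kv.2) cs) counts1
  (paper_ids.zip counts2).map (fun pc => [("arxiv_id", pc.1), ("count", pc.2)])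

-- ===== PRECONDITION & SPEC =====
def Spec_build_counts_rows_in_order (paper_ids : List String) (existing_counts_map : List (String × String)) (updated_counts_map : List (String × String)) (out : List (List (String × String))) : Prop := out = build_counts_rows_in_order_alt paper_ids existing_counts_map updated_counts_map
instance (paper_ids : List String) (existing_counts_map : List (String × String)) (updated_counts_map : List (String × String)) (out : List (List (String × String))) : Decidable (Spec_build_counts_rows_in_order paper_ids existing_counts_map updated_counts_map out) := by unfold Spec_build_counts_rows_in_order; infer_instance

-- ===== CLAIM (what is proved, stated in full; the proofs are below) =====
def Claim_equal_build_counts_rows_in_order : Prop := ∀ (paper_ids : List String) (existing_counts_map : List (String × String)) (updated_counts_map : List (String × String)), Dom_build_counts_rows_in_order paper_ids existing_counts_map updated_counts_map → Spec_build_counts_rows_in_order paper_ids existing_counts_map updated_counts_map (build_counts_rows_in_order paper_ids existing_counts_map updated_counts_map)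

-- ===== LEMMAS AND PROOFS =====

-- The positions index maps pid to exactly the (filtered) enumerate indices of pid.
theorem positions_getD (paper_ids : List String) (pid : String) :
    ((PySem.List.enumerate paper_ids).foldl
        (fun d p => d.modify p.2 [] (fun l => l ++ [p.1])) PySem.Dict.empty).getD pid []
      = (((PySem.List.enumerate paper_ids)).filter (fun p => p.2 == pid)).map (·.1) := by
  rw [show ((PySem.List.enumerate paper_ids).foldl
        (fun d p => d.modify p.2 [] (fun l => l ++ [p.1])) PySem.Dict.empty)
      = (((PySem.List.enumerate paper_ids).map Prod.swap).foldl
        (fun d p => d.modify p.1 [] (fun l => l ++ [p.2])) PySem.Dict.empty) from by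
    simp [List.foldl_map]]
  rw [PySem.Dict.getD_foldl_modify_append]
  simp [List.filter_map, List.map_map, Function.comp_def, Prod.swap]

-- Membership in the positions list of pid.
theorem mem_positions (paper_ids : List String) (pid : String) (j : Nat) :
    ((j : Int) ∈ ((PySem.List.enumerate paper_ids).foldl
        (fun d p => d.modify p.2 [] (fun l => l ++ [p.1])) PySem.Dict.empty).getD pid [])
      ↔ ∃ h : j < paper_ids.length, paper_ids[j] = pid := by
  rw [positions_getD]
  simp only [List.mem_map, List.mem_filter, PySem.List.mem_enumerate_iff]
  constructor
  · rintro ⟨p, ⟨⟨k, hk, rfl⟩, hpid⟩, hj⟩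
    simp only [zero_add, beq_iff_eq] at hpid hj
    have hkj : k = j := by omega
    subst hkj
    exact ⟨hk, hpid⟩
  · rintro ⟨h, hp⟩
    exact ⟨((j : Int), paper_ids[j]), ⟨⟨j, h, by simp⟩, by simp [hp]⟩, rfl⟩

-- Every stored position is nonnegative.
theorem positions_nonneg (paper_ids : List String) (pid : String) (i : Int)
    (h : i ∈ ((PySem.List.enumerate paper_ids).foldl
        (fun d p => d.modify p.2 [] (fun l => l ++ [p.1])) PySem.Dict.empty).getD pid []) :
    0 ≤ i := by
  rw [positions_getD] at h
  simp only [List.mem_map, List.mem_filter, PySem.List.mem_enumerate_iff] at h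
  rcases h with ⟨p, ⟨⟨k, hk, rfl⟩, -⟩, hj⟩
  simp only [zero_add] at hj
  omega

-- The inner scatter loop preserves the column length.
theorem len_setfold (idxs : List Int) (v : String) (cs : List String) :
    (idxs.foldl (fun cs i => cs.set i.toNat v) cs).length = cs.length := by
  induction idxs generalizing cs with
  | nil => rfl
  | cons i t ih => simp [List.foldl_cons, ih, List.length_set]

-- The inner scatter loop: set every listed index to v.
theorem getq_setfold (idxs : List Int) (v : String) (cs : List String) (j : Nat)
    (hnn : ∀ i ∈ idxs, 0 ≤ i) :
    (idxs.foldl (fun cs i => cs.set i.toNat v) cs)[j]?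
      = if (j : Int) ∈ idxs ∧ j < cs.length then some v else (cs[j]?) := by
  induction idxs generalizing cs with
  | nil => simp
  | cons i t ih =>
    have hi0 : 0 ≤ i := hnn i List.mem_cons_self
    have hnn' : ∀ x ∈ t, 0 ≤ x := fun x hx => hnn x (List.mem_cons_of_mem _ hx)
    rw [List.foldl_cons, ih _ hnn']
    have hlen : (cs.set i.toNat v).length = cs.length := by simp
    by_cases hjl : j < cs.length
    · have hjs : cs[j]? = some cs[j] := List.getElem?_eq_getElem hjl
      by_cases hji : (j : Int) = i
      · have hjn : i.toNat = j := by omega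
        by_cases hmt : (j : Int) ∈ t <;>
          simp [List.mem_cons, hji, hmt, hlen, hjl, List.getElem?_set, hjn, hjs]
      · have hjn : i.toNat ≠ j := by omega
        by_cases hmt : (j : Int) ∈ t <;>
          simp [List.mem_cons, hji, hmt, hlen, hjl, List.getElem?_set, hjn]
    · have hjs : cs[j]? = none := by
        rw [List.getElem?_eq_none_iff]; omega
      by_cases hti : i.toNat = j <;>
        simp [hlen, hjl, List.getElem?_set, hti, hjs]

-- The outer scatter loop preserves the column length.
theorem len_scatter (paper_ids : List String) (L : List (String × String)) (cs : List String) :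
    (L.foldl (fun cs kv =>
        (((PySem.List.enumerate paper_ids).foldl
            (fun d p => d.modify p.2 [] (fun l => l ++ [p.1])) PySem.Dict.empty).getD kv.1 []).foldl
          (fun cs i => cs.set i.toNat kv.2) cs) cs).length = cs.length := by
  induction L generalizing cs with
  | nil => rfl
  | cons kv t ih => rw [List.foldl_cons, ih, len_setfold]

-- The outer scatter loop computes a last-match lookup over the item list, falling back to cs.
theorem getq_scatter (paper_ids : List String) (L : List (String × String))
    (cs : List String) (hc : cs.length = paper_ids.length) (j : Nat) (hj : j < paper_ids.length) :
    (L.foldl (fun cs kv =>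
        (((PySem.List.enumerate paper_ids).foldl
            (fun d p => d.modify p.2 [] (fun l => l ++ [p.1])) PySem.Dict.empty).getD kv.1 []).foldl
          (fun cs i => cs.set i.toNat kv.2) cs) cs)[j]?
      = (List.lookup paper_ids[j] L.reverse).or (cs[j]?) := by
  induction L generalizing cs with
  | nil => simp
  | cons kv t ih =>
    rw [List.foldl_cons, ih _ (by rw [len_setfold]; exact hc)]
    rw [getq_setfold _ _ _ _ (fun i hi => positions_nonneg _ _ _ hi)]
    rw [List.reverse_cons, List.lookup_append]
    have hmem : ((j : Int) ∈ ((PySem.List.enumerate paper_ids).foldl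
        (fun d p => d.modify p.2 [] (fun l => l ++ [p.1])) PySem.Dict.empty).getD kv.1 [])
        ↔ paper_ids[j] = kv.1 := by
      rw [mem_positions]
      exact ⟨fun ⟨_, hp⟩ => hp, fun hp => ⟨hj, hp⟩⟩
    by_cases hpk : paper_ids[j] = kv.1
    · have hb : (paper_ids[j] == kv.1) = true := by simp [hpk]
      have hcnd : ((j : Int) ∈ ((PySem.List.enumerate paper_ids).foldl
          (fun d p => d.modify p.2 [] (fun l => l ++ [p.1])) PySem.Dict.empty).getD kv.1 [])
          ∧ j < cs.length := ⟨hmem.mpr hpk, by omega⟩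
      rw [if_pos hcnd]
      cases List.lookup paper_ids[j] t.reverse <;> simp [List.lookup, hb]
    · have hb : (paper_ids[j] == kv.1) = false := by simp [hpk]
      have hcnd : ¬ (((j : Int) ∈ ((PySem.List.enumerate paper_ids).foldl
          (fun d p => d.modify p.2 [] (fun l => l ++ [p.1])) PySem.Dict.empty).getD kv.1 [])
          ∧ j < cs.length) := by
        intro hcc
        exact hpk (hmem.mp hcc.1)
      rw [if_neg hcnd]
      cases List.lookup paper_ids[j] t.reverse <;> simp [List.lookup, hb]

-- Dict.get? is first-match lookup on the items list.
theorem get?_eq_lookup (l : List (String × String)) (k : String) :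
    (PySem.Dict.mk l).get? k = List.lookup k l := by
  induction l with
  | nil => rfl
  | cons p t ih =>
    rw [show (p :: t) = ((p.1, p.2) :: t) from by simp]
    rw [PySem.Dict.get?_mk_cons]
    rcases eq_or_ne k p.1 with h | h
    · have hb : (p.1 == k) = true := by simp [h]
      have hb2 : (k == p.1) = true := by simp [h]
      simp [List.lookup, hb, hb2]
    · have hb : (p.1 == k) = false := by simp [Ne.symm h]
      have hb2 : (k == p.1) = false := by simp [h]
      simp [List.lookup, hb, hb2, ih]

-- With nodup keys, lookup in the reversed items equals lookup in the items.
theorem lookup_reverse_eq (l : List (String × String)) (k : String)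
    (h : (l.map Prod.fst).Nodup) : List.lookup k l.reverse = List.lookup k l := by
  induction l with
  | nil => rfl
  | cons p t ih =>
    simp only [List.map_cons, List.nodup_cons] at h
    rw [List.reverse_cons, List.lookup_append, ih h.2]
    rcases eq_or_ne k p.1 with hk | hk
    · have hb2 : (k == p.1) = true := by simp [hk]
      have hnone : List.lookup k t = none := by
        rw [List.lookup_eq_none_iff, hk]
        intro a ha
        simp only [bne_iff_ne, ne_eq]
        intro hq
        exact h.1 (hq ▸ List.mem_map_of_mem (f := Prod.fst) ha)
      simp [List.lookup, hb2, hnone]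
    · have hb2 : (k == p.1) = false := by simp [hk]
      cases hlt : List.lookup k t <;> simp [List.lookup, hb2, hlt]

-- A's branch between the two dicts is an Option.or of the two lookups.
theorem branch_eq_or (e u : PySem.Dict String String) (pid : String) :
    (if u.contains pid then u.getD pid "" else e.getD pid "")
      = (((u.get? pid).or (e.get? pid)).getD "") := by
  rw [PySem.Dict.contains_eq_isSome_get?]
  simp only [PySem.Dict.getD_eq_get?_getD]
  cases u.get? pid <;> simp

-- Lookup in a Dict built by ofList, via the reversed items, is get?.
theorem lookup_items_reverse (l : List (String × String)) (k : String) :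
    List.lookup k (PySem.Dict.ofList l).items.reverse = (PySem.Dict.ofList l).get? k := by
  rw [lookup_reverse_eq _ _ (PySem.Dict.nodup_keys_ofList l), ← get?_eq_lookup]

-- ===== VERDICT (by name: the statement is the Claim_ definition above) =====
theorem build_counts_rows_in_order_spec : Claim_equal_build_counts_rows_in_order := by
  intro paper_ids e u _
  unfold Spec_build_counts_rows_in_order build_counts_rows_in_order build_counts_rows_in_order_alt
  simp only []
  rw [show (fun (rows : List (List (String × String))) pid =>
        if (PySem.Dict.ofList u).contains pid then
          rows ++ [[("arxiv_id", pid), ("count", (PySem.Dict.ofList u).getD pid "")]]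
        else
          rows ++ [[("arxiv_id", pid), ("count", (PySem.Dict.ofList e).getD pid "")]])
      = (fun rows pid => rows ++ [[("arxiv_id", pid),
          ("count", ((((PySem.Dict.ofList u).get? pid).or ((PySem.Dict.ofList e).get? pid)).getD ""))]]) from by
    funext rows pid
    by_cases h : (PySem.Dict.ofList u).contains pid <;>
      rw [← branch_eq_or] <;> simp [h]]
  rw [PySem.List.foldl_append_singleton_eq_map, List.nil_append]
  set P := fun (d : PySem.Dict String (List Int)) (p : Int × String) =>
    d.modify p.2 [] (fun l => l ++ [p.1]) with hP
  have hl1 : ((PySem.Dict.ofList e).items.foldl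
      (fun cs kv => (((PySem.List.enumerate paper_ids).foldl P PySem.Dict.empty).getD kv.1 []).foldl
        (fun cs i => cs.set i.toNat kv.2) cs)
      (List.replicate paper_ids.length "")).length = paper_ids.length := by
    rw [hP, len_scatter, List.length_replicate]
  have hl2 : ((PySem.Dict.ofList u).items.foldl
      (fun cs kv => (((PySem.List.enumerate paper_ids).foldl P PySem.Dict.empty).getD kv.1 []).foldl
        (fun cs i => cs.set i.toNat kv.2) cs)
      ((PySem.Dict.ofList e).items.foldl
        (fun cs kv => (((PySem.List.enumerate paper_ids).foldl P PySem.Dict.empty).getD kv.1 []).foldl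
          (fun cs i => cs.set i.toNat kv.2) cs)
        (List.replicate paper_ids.length ""))).length = paper_ids.length := by
    rw [hP, len_scatter]; exact hl1
  apply List.ext_getElem
  · simp [hl2]
  · intro j hj1 hj2
    simp only [List.length_map] at hj1
    have hjn : j < paper_ids.length := hj1
    have hcnt : (((PySem.Dict.ofList u).items.foldl
        (fun cs kv => (((PySem.List.enumerate paper_ids).foldl P PySem.Dict.empty).getD kv.1 []).foldl
          (fun cs i => cs.set i.toNat kv.2) cs)
        ((PySem.Dict.ofList e).items.foldl
          (fun cs kv => (((PySem.List.enumerate paper_ids).foldl P PySem.Dict.empty).getD kv.1 []).foldl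
            (fun cs i => cs.set i.toNat kv.2) cs)
          (List.replicate paper_ids.length "")))[j]?)
        = some ((((PySem.Dict.ofList u).get? paper_ids[j]).or
            ((PySem.Dict.ofList e).get? paper_ids[j])).getD "") := by
      rw [hP, getq_scatter _ _ _ hl1 _ hjn, getq_scatter _ _ _ (by simp) _ hjn]
      rw [List.getElem?_replicate]
      rw [if_pos hjn]
      rw [lookup_items_reverse, lookup_items_reverse]
      cases (PySem.Dict.ofList u).get? paper_ids[j] <;>
        cases (PySem.Dict.ofList e).get? paper_ids[j] <;> simp
    simp only [List.getElem_map, List.getElem_zip]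
    rcases List.getElem?_eq_some_iff.mp hcnt with ⟨hlt, hval⟩
    simp [hval]
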